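-- pv_equiv track=rewrite | github.com/kiharalab/NuFold | nufold/data/parsers.py | parse_a3m
-- ===== SOURCE A (Python) =====
-- import string
-- from typing import Dict, Iterable, List, Optional, Sequence, Tuple, Set
--
-- DeletionMatrix = Sequence[Sequence[int]]
--
-- def parse_fasta(fasta_string: str) -> Tuple[Sequence[str], Sequence[str]]:
--     """Parses FASTA string and returns list of strings with amino-acid sequences.
--     Arguments:
--         fasta_string: The string contents of a FASTA file.
--     Returns:
--         A tuple of two lists:
--         * A list of sequences.
--         * A list of sequence descriptions taken from the comment lines. In the
--         same order as the sequences.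
--     """
--     sequences = []
--     descriptions = []
--     index = -1
--     for line in fasta_string.splitlines():
--         line = line.strip()
--         if line.startswith('>'):
--             index += 1
--             descriptions.append(line[1:])  # Remove the '>' at the beginning.
--             sequences.append('')
--             continue
--         elif not line:
--             continue  # Skip blank lines.
--         sequences[index] += line
--     return sequences, descriptions
--
-- def parse_a3m(a3m_string: str) -> Tuple[Sequence[str], DeletionMatrix]:
--     """Parses sequences and deletion matrix from a3m format alignment.
--     Args:
--         a3m_string: The string contents of a a3m file. The first sequence in the
--             file should be the query sequence.
--     Returns:
--         A tuple of:
--             * A list of sequences that have been aligned to the query. These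
--                 might contain duplicates.
--             * The deletion matrix for the alignment as a list of lists. The element
--                 at `deletion_matrix[i][j]` is the number of residues deleted from
--                 the aligned sequence i at residue position j.
--     """
--     sequences, _ = parse_fasta(a3m_string)
--     deletion_matrix = []
--     for msa_sequence in sequences:
--         deletion_vec = []
--         deletion_count = 0
--         for j in msa_sequence:
--             if j.islower():
--                 deletion_count += 1
--             else:
--                 deletion_vec.append(deletion_count)
--                 deletion_count = 0
--         deletion_matrix.append(deletion_vec)
--
--     # Make the MSA matrix out of aligned (deletion-free) sequences.
--     deletion_table = str.maketrans("", "", string.ascii_lowercase)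
--     aligned_sequences = [s.translate(deletion_table) for s in sequences]
--     return aligned_sequences, deletion_matrix
-- ===== SOURCE B (Python) =====
-- import string
--
-- def parse_a3m(a3m_string):
--     """Single streaming pass over the lines: builds aligned sequences and the
--     deletion matrix record by record, without materialising the raw sequences."""
--     aligned_sequences = []
--     deletion_matrix = []
--     pending = 0
--     for line in a3m_string.splitlines():
--         line = line.strip()
--         if line.startswith('>'):
--             aligned_sequences.append('')
--             deletion_matrix.append([])
--             pending = 0
--         elif line:
--             vec = deletion_matrix[-1]
--             buf = []
--             for ch in line:
--                 if ch in string.ascii_lowercase: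
--                     pending += 1
--                 else:
--                     vec.append(pending)
--                     pending = 0
--                     buf.append(ch)
--             aligned_sequences[-1] += ''.join(buf)
--     return aligned_sequences, deletion_matrix
-- ===== Notes on version B (the rewrite author's own statement) =====
-- stated objective: alternative
-- what changed: Instead of parse_fasta building raw sequences and then two post-passes per sequence (a deletion-counting loop plus str.translate), B makes one streaming pass over the lines, growing the aligned string and the deletion vector of the current record simultaneously while carrying the pending lowercase count across line boundaries.
import Mathlib
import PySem

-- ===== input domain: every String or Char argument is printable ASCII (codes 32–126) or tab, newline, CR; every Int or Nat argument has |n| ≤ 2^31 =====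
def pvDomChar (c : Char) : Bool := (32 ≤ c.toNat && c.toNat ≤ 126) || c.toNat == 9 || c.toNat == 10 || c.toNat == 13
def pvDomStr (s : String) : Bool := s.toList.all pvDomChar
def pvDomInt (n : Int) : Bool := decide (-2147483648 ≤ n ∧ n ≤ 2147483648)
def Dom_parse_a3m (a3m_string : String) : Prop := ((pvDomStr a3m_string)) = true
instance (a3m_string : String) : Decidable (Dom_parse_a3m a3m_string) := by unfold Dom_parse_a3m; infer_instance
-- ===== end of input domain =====

-- B replaces A's three passes (parse_fasta, a deletion-count loop per sequence, str.translate)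
-- by ONE streaming pass over the lines building both outputs record by record (objective: alternative).

-- ===== PORT A =====
-- On the printable-ASCII domain, `j.islower()` and `j in string.ascii_lowercase` are both
-- exactly the range check a–z (PySem.Chars.islower is that check).
def pvIsLow (c : Char) : Bool := PySem.Chars.islower c

-- one iteration of parse_fasta's loop; state = (sequences, descriptions, index)
def pvStepFastaA (st : List (List Char) × List (List Char) × Int) (line : List Char) :
    List (List Char) × List (List Char) × Int :=
  let line := PySem.Chars.strip line
  if PySem.Chars.startswith line ['>'] then
    (st.1 ++ [[]], st.2.1 ++ [PySem.Chars.slice line (some 1) none], st.2.2 + 1)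
  else if line = [] then st
  else
    match PySem.List.pyIdx? st.1.length st.2.2 with
    | none => st        -- Python raises IndexError here; excluded by Pre_parse_a3m
    | some k => (st.1.set k (st.1.getD k [] ++ line), st.2.1, st.2.2)

def parse_fasta (fasta_string : List Char) : List (List Char) × List (List Char) :=
  let st := (PySem.Chars.splitlines fasta_string).foldl pvStepFastaA ([], [], -1)
  (st.1, st.2.1)

-- one iteration of A's inner deletion loop; state = (deletion_vec, deletion_count)
def pvDelStep (st : List Int × Int) (c : Char) : List Int × Int :=
  if pvIsLow c then (st.1, st.2 + 1) else (st.1 ++ [st.2], 0)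

def parse_a3m (a3m_string : String) : List String × List (List Int) :=
  let sequences := (parse_fasta a3m_string.toList).1
  let deletion_matrix := sequences.foldl (fun acc s => acc ++ [(s.foldl pvDelStep ([], 0)).1]) []
  -- s.translate with the delete-table of string.ascii_lowercase removes exactly the chars a–z
  let aligned_sequences := sequences.map (fun s => String.ofList (s.filter (fun c => !pvIsLow c)))
  (aligned_sequences, deletion_matrix)

-- ===== PORT B =====
-- replace the last element of a list (B's `xs[-1] = …` on a known-nonempty list)
def pvSetLast {α : Type} : List α → α → List α
  | [], _ => []
  | [_], y => [y]
  | x :: xs, y => x :: pvSetLast xs y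

-- one character of B's inner loop; state = (vec, buf, pending)
def pvInnerB (st : List Int × List Char × Int) (c : Char) : List Int × List Char × Int :=
  if pvIsLow c then (st.1, st.2.1, st.2.2 + 1)
  else (st.1 ++ [st.2.2], st.2.1 ++ [c], 0)

-- one line of B's streaming pass; state = (aligned_sequences, deletion_matrix, pending)
def pvStepB (st : List (List Char) × List (List Int) × Int) (line : List Char) :
    List (List Char) × List (List Int) × Int :=
  let line := PySem.Chars.strip line
  if PySem.Chars.startswith line ['>'] then
    (st.1 ++ [[]], st.2.1 ++ [[]], 0)
  else if line ≠ [] then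
    match PySem.List.pyGet? st.2.1 (-1) with
    | none => st        -- Python raises IndexError here; excluded by Pre_parse_a3m
    | some vec =>
      let r := line.foldl pvInnerB (vec, [], st.2.2)
      match PySem.List.pyGet? st.1 (-1) with
      | none => st      -- unreachable: both lists always grow together
      | some lastA => (pvSetLast st.1 (lastA ++ r.2.1), pvSetLast st.2.1 r.1, r.2.2)
  else st

def parse_a3m_alt (a3m_string : String) : List String × List (List Int) :=
  let st := (PySem.Chars.splitlines a3m_string.toList).foldl pvStepB ([], [], 0)
  (st.1.map String.ofList, st.2.1)

-- ===== PRECONDITION & SPEC =====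
-- Pre_ excludes exactly the inputs on which A raises IndexError: a non-blank line that is not
-- a '>' header occurring before the first header (then parse_fasta does sequences[-1] on []).
def Pre_parse_a3m (a3m_string : String) : Prop :=
  (((PySem.Chars.splitlines a3m_string.toList).takeWhile
      (fun l => !PySem.Chars.startswith (PySem.Chars.strip l) ['>'])).all
    (fun l => (PySem.Chars.strip l).isEmpty)) = true
instance (a3m_string : String) : Decidable (Pre_parse_a3m a3m_string) := by
  unfold Pre_parse_a3m; infer_instance

def pvWitness_parse_a3m : String := ">q\nAbC\n>s\n-deF"

def Spec_parse_a3m (a3m_string : String) (out : List String × List (List Int)) : Prop :=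
  out = parse_a3m_alt a3m_string
instance (a3m_string : String) (out : List String × List (List Int)) :
    Decidable (Spec_parse_a3m a3m_string out) := by unfold Spec_parse_a3m; infer_instance

-- ===== CLAIM (what is proved, stated in full; the proofs are below) =====
def Claim_equal_parse_a3m : Prop := ∀ (a3m_string : String), Dom_parse_a3m a3m_string →
  Pre_parse_a3m a3m_string → Spec_parse_a3m a3m_string (parse_a3m a3m_string)

-- ===== LEMMAS AND PROOFS =====
-- proof-side abbreviations for A's per-sequence post-processing
def pvVec (s : List Char) : List Int := (s.foldl pvDelStep ([], 0)).1
def pvPend (s : List Char) : Int := (s.foldl pvDelStep ([], 0)).2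
def pvAl (s : List Char) : List Char := s.filter (fun c => !pvIsLow c)

theorem pvDelStep_acc (s : List Char) : ∀ (v : List Int) (p : Int),
    s.foldl pvDelStep (v, p) =
      (v ++ (s.foldl pvDelStep ([], p)).1, (s.foldl pvDelStep ([], p)).2) := by
  induction s with
  | nil => intro v p; simp
  | cons c t ih =>
    intro v p
    by_cases h : pvIsLow c = true
    · simp only [List.foldl_cons, pvDelStep, h, if_pos]
      exact ih v (p + 1)
    · simp only [List.foldl_cons, pvDelStep, h, if_neg, Bool.false_eq_true,
        not_false_eq_true, if_neg]
      simp only [List.nil_append]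
      rw [ih (v ++ [p]) 0, ih [p] 0]
      simp

theorem pvInnerB_spec (s : List Char) : ∀ (vec : List Int) (buf : List Char) (p : Int),
    s.foldl pvInnerB (vec, buf, p) =
      (vec ++ (s.foldl pvDelStep ([], p)).1, buf ++ pvAl s, (s.foldl pvDelStep ([], p)).2) := by
  induction s with
  | nil => intro vec buf p; simp [pvAl]
  | cons c t ih =>
    intro vec buf p
    by_cases h : pvIsLow c = true
    · simp only [List.foldl_cons, pvInnerB, pvDelStep, h, if_pos, pvAl, List.filter_cons,
        Bool.not_true, Bool.false_eq_true, if_neg, not_false_eq_true]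
      exact ih vec buf (p + 1)
    · simp only [List.foldl_cons, pvInnerB, pvDelStep, h, Bool.false_eq_true, not_false_eq_true,
        if_neg, pvAl, List.filter_cons]
      have hc : (!pvIsLow c) = true := by simp [h]
      simp only [List.nil_append]
      rw [ih (vec ++ [p]) (buf ++ [c]) 0, pvDelStep_acc t [p] 0]
      simp [pvAl]

theorem pvSetLast_eq_set {α : Type} (xs : List α) (y : α) :
    pvSetLast xs y = xs.set (xs.length - 1) y := by
  induction xs with
  | nil => rfl
  | cons x t ih =>
    cases t with
    | nil => rfl
    | cons a u =>
      simp only [pvSetLast, ih, List.length_cons]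
      rfl

theorem pvGetLastD_eq_getD {α : Type} (xs : List α) (d : α) :
    xs.getLastD d = xs.getD (xs.length - 1) d := by
  cases h : xs.getLast? with
  | none =>
    have : xs = [] := by simpa using h
    subst this; rfl
  | some a =>
    rw [List.getLastD_eq_getLast?, h]
    have hne : xs ≠ [] := by rintro rfl; simp at h
    have hlt : xs.length - 1 < xs.length := by
      have : 0 < xs.length := List.length_pos_iff.mpr hne
      omega
    rw [List.getD_eq_getElem xs d hlt]
    have h2 := List.getLast?_eq_getElem? (l := xs)
    rw [h, List.getElem?_eq_getElem hlt] at h2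
    exact (Option.some.injEq _ _ ▸ h2 : _)


theorem pvMap_getLastD {α β : Type} (f : α → β) (xs : List α) (h : xs ≠ []) (d : α) (d' : β) :
    (xs.map f).getLastD d' = f (xs.getLastD d) := by
  rw [List.getLastD_eq_getLast?, List.getLastD_eq_getLast?, List.getLast?_map]
  cases h' : xs.getLast? with
  | none => exact absurd (List.getLast?_eq_none_iff.mp h') h
  | some a => rfl

theorem pvDel_append (a b : List Char) :
    (a ++ b).foldl pvDelStep ([], 0) =
      (pvVec a ++ (b.foldl pvDelStep ([], pvPend a)).1, (b.foldl pvDelStep ([], pvPend a)).2) := by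
  rw [List.foldl_append]
  have h : (a.foldl pvDelStep ([], 0)) = (pvVec a, pvPend a) := rfl
  rw [h, pvDelStep_acc b (pvVec a) (pvPend a)]

theorem pvIdx_last (n : Nat) (h : 0 < n) :
    PySem.List.pyIdx? n ((n : Int) - 1) = some (n - 1) := by
  unfold PySem.List.pyIdx?
  rw [if_pos (by omega), if_pos (by omega)]
  congr 1
  omega

theorem pvGetLastD_set_last {α : Type} (xs : List α) (h : xs ≠ []) (y d : α) :
    (xs.set (xs.length - 1) y).getLastD d = y := by
  have hl : 0 < xs.length := List.length_pos_iff.mpr h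
  rw [pvGetLastD_eq_getD, List.length_set]
  rw [List.getD_eq_getElem _ _ (by rw [List.length_set]; omega)]
  exact List.getElem_set_self _

theorem pvPyGet_neg_one {α : Type} (xs : List α) (h : xs ≠ []) (d : α) :
    PySem.List.pyGet? xs (-1) = some (xs.getLastD d) := by
  have hn : 0 < xs.length := List.length_pos_iff.mpr h
  have hlt : xs.length - 1 < xs.length := by omega
  unfold PySem.List.pyGet? PySem.List.pyIdx?
  rw [if_neg (by omega), if_pos (by omega)]
  simp only [Int.neg_neg, Int.toNat_one, Option.bind_some]
  rw [List.getElem?_eq_getElem hlt, pvGetLastD_eq_getD, List.getD_eq_getElem _ _ hlt]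

theorem pvLoop_eq (ls : List (List Char)) : ∀ (seqs descs : List (List Char)),
    (seqs = [] →
      ((ls.takeWhile (fun l => !PySem.Chars.startswith (PySem.Chars.strip l) ['>'])).all
        (fun l => (PySem.Chars.strip l).isEmpty)) = true) →
    ls.foldl pvStepB (seqs.map pvAl, seqs.map pvVec, pvPend (seqs.getLastD [])) =
      ((ls.foldl pvStepFastaA (seqs, descs, (seqs.length : Int) - 1)).1.map pvAl,
       (ls.foldl pvStepFastaA (seqs, descs, (seqs.length : Int) - 1)).1.map pvVec,
       pvPend ((ls.foldl pvStepFastaA (seqs, descs, (seqs.length : Int) - 1)).1.getLastD [])) := by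
  induction ls with
  | nil => intro seqs descs _; simp
  | cons l t ih =>
    intro seqs descs hblank
    by_cases hh : PySem.Chars.startswith (PySem.Chars.strip l) ['>'] = true
    · -- header line: both sides open a fresh empty record
      have hne : seqs ++ [[]] ≠ [] := by simp
      have h2 := ih (seqs ++ [[]])
        (descs ++ [PySem.Chars.slice (PySem.Chars.strip l) (some 1) none])
        (fun h => absurd h hne)
      simp only [List.foldl_cons, pvStepB, pvStepFastaA, hh, if_pos]
      simp only [List.map_append, List.map_cons, List.map_nil, List.getLastD_concat,
        List.length_append, List.length_cons, List.length_nil] at h2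
      have e0 : pvPend ([] : List Char) = 0 := rfl
      have e1 : pvAl ([] : List Char) = [] := rfl
      have e2 : pvVec ([] : List Char) = [] := rfl
      rw [e0, e1, e2] at h2
      have e3 : (seqs.length : Int) - 1 + 1 = ((seqs.length + 0 + 1 : Nat) : Int) - 1 := by
        push_cast; ring
      rw [e3]
      exact h2
    · simp only [Bool.not_eq_true] at hh
      by_cases hb : PySem.Chars.strip l = []
      · -- blank line: both sides skip
        have hbl : seqs = [] →
            ((t.takeWhile (fun l => !PySem.Chars.startswith (PySem.Chars.strip l) ['>'])).all
              (fun l => (PySem.Chars.strip l).isEmpty)) = true := by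
          intro h0
          have h1 := hblank h0
          rw [List.takeWhile_cons] at h1
          simp only [hh, Bool.not_false, if_pos, List.all_cons, Bool.and_eq_true] at h1
          exact h1.2
        simp only [List.foldl_cons, pvStepB, pvStepFastaA, hb,
          if_neg, not_false_eq_true, if_pos, ne_eq, not_true_eq_false]
        exact ih seqs descs hbl
      · -- content line
        have hs : seqs ≠ [] := by
          intro h0
          have h1 := hblank h0
          rw [List.takeWhile_cons] at h1
          simp only [hh, Bool.not_false, if_pos, List.all_cons, Bool.and_eq_true] at h1
          exact hb (List.isEmpty_iff.mp h1.1)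
        have hn : 0 < seqs.length := List.length_pos_iff.mpr hs
        have hidx : PySem.List.pyIdx? seqs.length ((seqs.length : Int) - 1) =
            some (seqs.length - 1) := pvIdx_last _ hn
        have hgetD : seqs.getD (seqs.length - 1) [] = seqs.getLastD [] :=
          (pvGetLastD_eq_getD seqs []).symm
        have hAlast : (seqs.map pvAl).getLastD [] = pvAl (seqs.getLastD []) :=
          pvMap_getLastD _ _ hs _ _
        have hVlast : (seqs.map pvVec).getLastD [] = pvVec (seqs.getLastD []) :=
          pvMap_getLastD _ _ hs _ _
        have hr := pvInnerB_spec (PySem.Chars.strip l) (pvVec (seqs.getLastD [])) []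
          (pvPend (seqs.getLastD []))
        have hdel := pvDel_append (seqs.getLastD []) (PySem.Chars.strip l)
        have hs' : seqs.set (seqs.length - 1) (seqs.getLastD [] ++ PySem.Chars.strip l) ≠ [] := by
          intro h0
          have hlen0 : (seqs.set (seqs.length - 1)
              (seqs.getLastD [] ++ PySem.Chars.strip l)).length = 0 := by rw [h0]; rfl
          rw [List.length_set] at hlen0
          omega
        have h2 := ih (seqs.set (seqs.length - 1) (seqs.getLastD [] ++ PySem.Chars.strip l))
          descs (fun h => absurd h hs')
        rw [List.length_set] at h2
        simp only [List.foldl_cons, pvStepB, pvStepFastaA, hh, Bool.false_eq_true, if_neg,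
          not_false_eq_true, ne_eq, hidx]
        rw [if_neg hb, if_pos hb]
        simp only [pvPyGet_neg_one (seqs.map pvVec) (by simpa using hs) ([] : List Int),
          pvPyGet_neg_one (seqs.map pvAl) (by simpa using hs) ([] : List Char)]
        rw [hVlast, hr, hAlast, hgetD]
        have e1 : pvSetLast (seqs.map pvAl)
            (pvAl (seqs.getLastD []) ++ ([] ++ pvAl (PySem.Chars.strip l))) =
            (seqs.set (seqs.length - 1) (seqs.getLastD [] ++ PySem.Chars.strip l)).map pvAl := by
          rw [pvSetLast_eq_set, List.length_map, List.map_set]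
          congr 1
          simp [pvAl, List.filter_append]
        have e2 : pvSetLast (seqs.map pvVec)
            (pvVec (seqs.getLastD []) ++
              ((PySem.Chars.strip l).foldl pvDelStep ([], pvPend (seqs.getLastD []))).1) =
            (seqs.set (seqs.length - 1) (seqs.getLastD [] ++ PySem.Chars.strip l)).map pvVec := by
          rw [pvSetLast_eq_set, List.length_map, List.map_set]
          congr 1
          exact (congrArg Prod.fst hdel).symm
        have e3 : ((PySem.Chars.strip l).foldl pvDelStep ([], pvPend (seqs.getLastD []))).2 =
            pvPend ((seqs.set (seqs.length - 1)
              (seqs.getLastD [] ++ PySem.Chars.strip l)).getLastD []) := by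
          rw [pvGetLastD_set_last _ hs]
          exact (congrArg Prod.snd hdel).symm
        rw [e1, e2, e3]
        exact h2

-- ===== VERDICT (by name: the statement is the Claim_ definition above) =====
theorem parse_a3m_spec : Claim_equal_parse_a3m := by
  unfold Claim_equal_parse_a3m
  intro s _ hpre
  unfold Pre_parse_a3m at hpre
  unfold Spec_parse_a3m
  simp only [parse_a3m, parse_a3m_alt, parse_fasta]
  have h := pvLoop_eq (PySem.Chars.splitlines s.toList) [] [] (fun _ => hpre)
  simp only [List.map_nil, List.getLastD_nil, List.length_nil, Nat.cast_zero, zero_sub] at h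
  have h0 : pvPend ([] : List Char) = 0 := rfl
  rw [h0] at h
  rw [h]
  refine Prod.ext ?_ ?_
  · simp [pvAl, List.map_map, Function.comp]
  · rw [PySem.List.foldl_append_singleton_eq_map]
    simp [pvVec]
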